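-- pv_equiv track=rewrite | github.com/ryandakine/campaign-cannon-2 | src/campaign_cannon/import_/markdown_import.py | _parse_post_metadata
-- ===== SOURCE A (Python) =====
-- def _parse_post_metadata(post_body: str) -> tuple[dict[str, str], str]:
--     """Extract key: value metadata lines from the start of a post body.
--
--     Metadata lines are at the top before the first blank line or content paragraph.
--     """
--     meta: dict[str, str] = {}
--     content_lines: list[str] = []
--     in_metadata = True
--
--     for line in post_body.splitlines():
--         stripped = line.strip()
--         if in_metadata and ":" in stripped and not stripped.startswith("#"):
--             key, _, value = stripped.partition(":")
--             key = key.strip().lower()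
--             value = value.strip()
--             if key in ("scheduled", "media", "subreddit", "title"):
--                 meta[key] = value
--                 continue
--         if in_metadata and stripped == "":
--             in_metadata = False
--             continue
--         if in_metadata and ":" not in stripped:
--             in_metadata = False
--         content_lines.append(line)
--
--     return meta, "\n".join(content_lines)
-- ===== SOURCE B (Python) =====
-- def _parse_post_metadata(post_body: str) -> tuple[dict[str, str], str]:
--     """Declarative pipeline: split header off with takewhile, then build meta via a
--     dict comprehension and content via a filter plus a bulk tail, no stateful flag."""
--     import itertools
--
--     def is_header(line: str) -> bool:
--         s = line.strip()
--         return s != "" and ":" in s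
--
--     def keyval(line: str) -> tuple[str, str]:
--         key, _, value = line.strip().partition(":")
--         return key.strip().lower(), value.strip()
--
--     lines = post_body.splitlines()
--     header = list(itertools.takewhile(is_header, lines))
--     rest = lines[len(header):]
--
--     KEYS = ("scheduled", "media", "subreddit", "title")
--     meta = {k: v
--             for k, v in map(keyval, (l for l in header if not l.strip().startswith("#")))
--             if k in KEYS}
--     content = [l for l in header
--                if l.strip().startswith("#") or keyval(l)[0] not in KEYS]
--     if rest and rest[0].strip() == "":
--         rest = rest[1:]
--     return meta, "\n".join(content + rest)
-- ===== Notes on version B (the rewrite author's own statement) =====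
-- stated objective: alternative
-- what changed: Replaces A's stateful single pass with an in_metadata flag by a declarative pipeline: itertools.takewhile splits the header off at the first blank or colon-less line, metadata comes from a dict comprehension over the parsed non-# header lines, and content is a filter of the header concatenated with the bulk tail (blank terminator dropped).
import Mathlib
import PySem

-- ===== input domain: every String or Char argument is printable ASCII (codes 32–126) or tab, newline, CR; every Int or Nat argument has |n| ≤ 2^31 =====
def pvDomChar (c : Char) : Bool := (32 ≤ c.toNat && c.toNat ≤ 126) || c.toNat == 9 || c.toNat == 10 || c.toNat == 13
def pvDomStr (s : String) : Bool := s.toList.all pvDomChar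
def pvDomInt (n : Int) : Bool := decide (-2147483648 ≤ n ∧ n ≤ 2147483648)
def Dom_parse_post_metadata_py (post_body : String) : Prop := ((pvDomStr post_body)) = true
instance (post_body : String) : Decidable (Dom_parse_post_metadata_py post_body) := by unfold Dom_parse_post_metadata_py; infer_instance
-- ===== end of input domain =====

-- B replaces A's stateful flagged single pass by a declarative pipeline (takeWhile split,
-- dict comprehension for meta, filter + bulk tail for content); same cost, different structure
-- (return value only; nothing is mutated).

-- s.partition(":") as (before, after-the-first-colon): exact for a single-character separator
-- (takeWhile/dropWhile on code points; ':' absent gives (s, "") like Python's (s, '', '')).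
def pvPartitionColon (s : String) : String × String :=
  (String.ofList (s.toList.takeWhile (· ≠ ':')), String.ofList ((s.toList.dropWhile (· ≠ ':')).drop 1))

-- ===== PORT A =====
-- one step of A's for-loop; state = (md, content_lines, in_metadata)
def pvStepA (st : PySem.Dict String String × List String × Bool) (line : String) :
    PySem.Dict String String × List String × Bool :=
  let md := st.1
  let content := st.2.1
  let inMeta := st.2.2
  let stripped := PySem.Str.strip line
  -- code after the first if-block (reached when that block does not `continue`)
  let rest :=
    if inMeta && (stripped == "") then (md, content, false)
    else
      let inMeta' := if inMeta && !(PySem.Str.isIn ":" stripped) then false else inMeta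
      (md, content ++ [line], inMeta')
  if inMeta && PySem.Str.isIn ":" stripped && !(PySem.Str.startswith stripped "#") then
    let kv := pvPartitionColon stripped
    let key := PySem.Str.lower (PySem.Str.strip kv.1)
    let value := PySem.Str.strip kv.2
    if key == "scheduled" || key == "media" || key == "subreddit" || key == "title" then
      (PySem.Dict.insert md key value, content, inMeta)
    else rest
  else rest

def parse_post_metadata_py (post_body : String) : (List (String × String)) × String :=
  let fin := (PySem.Str.splitlines post_body).foldl pvStepA (PySem.Dict.empty, [], true)
  (PySem.Dict.items fin.1, PySem.Str.join "\n" fin.2.1)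

-- ===== PORT B =====
-- Source B's is_header predicate
def pvIsHeader (line : String) : Bool :=
  let s := PySem.Str.strip line
  !(s == "") && PySem.Str.isIn ":" s

-- Source B's keyval helper
def pvKeyVal (line : String) : String × String :=
  let kv := pvPartitionColon (PySem.Str.strip line)
  (PySem.Str.lower (PySem.Str.strip kv.1), PySem.Str.strip kv.2)

def pvIsKey (k : String) : Bool :=
  k == "scheduled" || k == "media" || k == "subreddit" || k == "title"

def parse_post_metadata_py_alt (post_body : String) : (List (String × String)) × String :=
  let lines := PySem.Str.splitlines post_body
  let header := lines.takeWhile pvIsHeader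
  let rest := lines.drop header.length
  -- dict comprehension = fold of insert over the comprehension's sequence
  let md := (((header.filter (fun l => !(PySem.Str.startswith (PySem.Str.strip l) "#"))).map
      pvKeyVal).filter (fun kv => pvIsKey kv.1)).foldl
      (fun d kv => PySem.Dict.insert d kv.1 kv.2) PySem.Dict.empty
  let content := header.filter
      (fun l => PySem.Str.startswith (PySem.Str.strip l) "#" || !(pvIsKey (pvKeyVal l).1))
  let rest' :=
    match rest with
    | [] => []
    | l :: tl => if PySem.Str.strip l == "" then tl else l :: tl
  (PySem.Dict.items md, PySem.Str.join "\n" (content ++ rest'))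

-- ===== PRECONDITION & SPEC =====
def Spec_parse_post_metadata_py (post_body : String) (out : (List (String × String)) × String) : Prop := out = parse_post_metadata_py_alt post_body
instance (post_body : String) (out : (List (String × String)) × String) : Decidable (Spec_parse_post_metadata_py post_body out) := by unfold Spec_parse_post_metadata_py; infer_instance

-- ===== CLAIM (what is proved, stated in full; the proofs are below) =====
def Claim_equal_parse_post_metadata_py : Prop := ∀ (post_body : String), Dom_parse_post_metadata_py post_body → Spec_parse_post_metadata_py post_body (parse_post_metadata_py post_body)

-- ===== LEMMAS AND PROOFS =====

-- Source B's terminator adjustment, named for the proofs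
def pvSkipBlank : List String → List String
  | [] => []
  | l :: tl => if PySem.Str.strip l == "" then tl else l :: tl

-- once in_metadata is False, A's loop only appends every remaining line
lemma foldl_stepA_false (ls : List String) (m : PySem.Dict String String) (c : List String) :
    ls.foldl pvStepA (m, c, false) = (m, c ++ ls, false) := by
  induction ls generalizing c with
  | nil => simp
  | cons line tl ih =>
    simp only [List.foldl_cons]
    have h : pvStepA (m, c, false) line = (m, c ++ [line], false) := by
      simp [pvStepA]
    rw [h, ih]
    simp

lemma strip_ne_empty_of_isIn {s : String} (h : PySem.Str.isIn ":" s = true) : (s == "") = false := by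
  by_cases hs : s = ""
  · subst hs; exact absurd h (by decide)
  · simp [hs]

-- the flagged pass with in_metadata=True equals B's pipeline on the remaining lines
lemma foldl_stepA_true (ls : List String) (m : PySem.Dict String String) (c : List String) :
    ((ls.foldl pvStepA (m, c, true)).1 =
        ((((ls.takeWhile pvIsHeader).filter
              (fun l => !(PySem.Str.startswith (PySem.Str.strip l) "#"))).map pvKeyVal).filter
            (fun kv => pvIsKey kv.1)).foldl (fun d kv => PySem.Dict.insert d kv.1 kv.2) m ∧
     (ls.foldl pvStepA (m, c, true)).2.1 =
        c ++ (ls.takeWhile pvIsHeader).filter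
              (fun l => PySem.Str.startswith (PySem.Str.strip l) "#" || !(pvIsKey (pvKeyVal l).1))
          ++ pvSkipBlank (ls.drop (ls.takeWhile pvIsHeader).length)) := by
  induction ls generalizing m c with
  | nil => simp [pvSkipBlank]
  | cons line tl ih =>
    by_cases hin : PySem.Str.isIn ":" (PySem.Str.strip line) = true
    · have hne := strip_ne_empty_of_isIn hin
      have hh : pvIsHeader line = true := by
        simp only [pvIsHeader, hne, hin, Bool.not_false, Bool.true_and]
      by_cases hsh : PySem.Str.startswith (PySem.Str.strip line) "#" = true
      · -- '#...:' line: appended, stays in metadata on both sides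
        have hstep : pvStepA (m, c, true) line = (m, c ++ [line], true) := by
          simp only [pvStepA, hin, hsh, hne, Bool.true_and, Bool.and_true, Bool.not_true,
            Bool.and_false, Bool.false_eq_true, if_false, if_true, Bool.not_false]
        rw [List.foldl_cons, hstep]
        obtain ⟨h1, h2⟩ := ih m (c ++ [line])
        refine ⟨?_, ?_⟩
        · rw [h1]; simp only [hh, hsh, List.takeWhile_cons, List.filter_cons, List.map_cons, List.foldl_cons, List.length_cons, List.drop_succ_cons, List.cons_append, List.append_assoc, List.nil_append, if_true, if_false, Bool.not_true, Bool.not_false, Bool.true_or, Bool.false_or, Bool.or_true, Bool.or_false, Bool.true_eq_false, Bool.false_eq_true]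
        · rw [h2]; simp only [hh, hsh, List.takeWhile_cons, List.filter_cons, List.map_cons, List.foldl_cons, List.length_cons, List.drop_succ_cons, List.cons_append, List.append_assoc, List.nil_append, if_true, if_false, Bool.not_true, Bool.not_false, Bool.true_or, Bool.false_or, Bool.or_true, Bool.or_false, Bool.true_eq_false, Bool.false_eq_true]
      · simp only [Bool.not_eq_true] at hsh
        by_cases hk : pvIsKey (pvKeyVal line).1 = true
        · -- recognized key: stored on both sides, stays in metadata
          have hstep : pvStepA (m, c, true) line
              = (PySem.Dict.insert m (pvKeyVal line).1 (pvKeyVal line).2, c, true) := by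
            have hk' : (PySem.Str.lower (PySem.Str.strip (pvPartitionColon (PySem.Str.strip line)).1) == "scheduled"
                || PySem.Str.lower (PySem.Str.strip (pvPartitionColon (PySem.Str.strip line)).1) == "media"
                || PySem.Str.lower (PySem.Str.strip (pvPartitionColon (PySem.Str.strip line)).1) == "subreddit"
                || PySem.Str.lower (PySem.Str.strip (pvPartitionColon (PySem.Str.strip line)).1) == "title") = true := by
              simpa [pvKeyVal, pvIsKey] using hk
            simp only [pvStepA, pvKeyVal, hin, hsh, hne, hk', Bool.true_and, Bool.and_true, Bool.not_false,
              Bool.true_eq_false, Bool.false_eq_true, if_true, if_false]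
          rw [List.foldl_cons, hstep]
          obtain ⟨h1, h2⟩ := ih (PySem.Dict.insert m (pvKeyVal line).1 (pvKeyVal line).2) c
          refine ⟨?_, ?_⟩
          · rw [h1]; simp only [hh, hsh, hk, List.takeWhile_cons, List.filter_cons, List.map_cons, List.foldl_cons, List.length_cons, List.drop_succ_cons, List.cons_append, List.append_assoc, List.nil_append, if_true, if_false, Bool.not_true, Bool.not_false, Bool.true_or, Bool.false_or, Bool.or_true, Bool.or_false, Bool.true_eq_false, Bool.false_eq_true]
          · rw [h2]; simp only [hh, hsh, hk, List.takeWhile_cons, List.filter_cons, List.map_cons, List.foldl_cons, List.length_cons, List.drop_succ_cons, List.cons_append, List.append_assoc, List.nil_append, if_true, if_false, Bool.not_true, Bool.not_false, Bool.true_or, Bool.false_or, Bool.or_true, Bool.or_false, Bool.true_eq_false, Bool.false_eq_true]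
        · -- colon line with unknown key: appended, stays in metadata
          simp only [Bool.not_eq_true] at hk
          have hstep : pvStepA (m, c, true) line = (m, c ++ [line], true) := by
            have hk' : (PySem.Str.lower (PySem.Str.strip (pvPartitionColon (PySem.Str.strip line)).1) == "scheduled"
                || PySem.Str.lower (PySem.Str.strip (pvPartitionColon (PySem.Str.strip line)).1) == "media"
                || PySem.Str.lower (PySem.Str.strip (pvPartitionColon (PySem.Str.strip line)).1) == "subreddit"
                || PySem.Str.lower (PySem.Str.strip (pvPartitionColon (PySem.Str.strip line)).1) == "title") = false := by
              simpa [pvKeyVal, pvIsKey] using hk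
            simp only [pvStepA, pvKeyVal, hin, hsh, hne, hk', Bool.true_and, Bool.and_true, Bool.not_false,
              Bool.true_eq_false, Bool.false_eq_true, if_true, if_false]
            simp
          rw [List.foldl_cons, hstep]
          obtain ⟨h1, h2⟩ := ih m (c ++ [line])
          refine ⟨?_, ?_⟩
          · rw [h1]; simp only [hh, hsh, hk, List.takeWhile_cons, List.filter_cons, List.map_cons, List.foldl_cons, List.length_cons, List.drop_succ_cons, List.cons_append, List.append_assoc, List.nil_append, if_true, if_false, Bool.not_true, Bool.not_false, Bool.true_or, Bool.false_or, Bool.or_true, Bool.or_false, Bool.true_eq_false, Bool.false_eq_true]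
          · rw [h2]; simp only [hh, hsh, hk, List.takeWhile_cons, List.filter_cons, List.map_cons, List.foldl_cons, List.length_cons, List.drop_succ_cons, List.cons_append, List.append_assoc, List.nil_append, if_true, if_false, Bool.not_true, Bool.not_false, Bool.true_or, Bool.false_or, Bool.or_true, Bool.or_false, Bool.true_eq_false, Bool.false_eq_true]
    · simp only [Bool.not_eq_true] at hin
      have hh : pvIsHeader line = false := by
        by_cases hb0 : (PySem.Str.strip line == "") = true
        · simp only [pvIsHeader, hb0, Bool.not_true, Bool.false_and]
        · simp only [Bool.not_eq_true] at hb0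
          simp only [pvIsHeader, hb0, hin, Bool.not_false, Bool.true_and]
      have htw : List.takeWhile pvIsHeader (line :: tl) = [] := by
        simp [List.takeWhile_cons, hh]
      by_cases hb : (PySem.Str.strip line == "") = true
      · -- blank terminator: dropped, then everything appended
        have hstep : pvStepA (m, c, true) line = (m, c, false) := by
          simp only [pvStepA, hin, hb]
          simp
        rw [List.foldl_cons, hstep, foldl_stepA_false]
        have hsb : pvSkipBlank (line :: tl) = tl := by
          simp only [pvSkipBlank]; rw [if_pos hb]
        refine ⟨?_, ?_⟩
        · simp [htw]
        · simp [htw, hsb]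
      · -- colon-less terminator: kept, then everything appended
        have hstep : pvStepA (m, c, true) line = (m, c ++ [line], false) := by
          simp only [pvStepA, hin]
          simp [hb]
        rw [List.foldl_cons, hstep, foldl_stepA_false]
        have hsb : pvSkipBlank (line :: tl) = line :: tl := by
          simp only [pvSkipBlank]; rw [if_neg hb]
        refine ⟨?_, ?_⟩
        · simp [htw]
        · simp [htw, hsb]

-- ===== VERDICT (by name: the statement is the Claim_ definition above) =====
theorem parse_post_metadata_py_spec : Claim_equal_parse_post_metadata_py := by
  intro post_body _
  unfold Spec_parse_post_metadata_py parse_post_metadata_py parse_post_metadata_py_alt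
  obtain ⟨h1, h2⟩ := foldl_stepA_true (PySem.Str.splitlines post_body) PySem.Dict.empty []
  have hsb : pvSkipBlank ((PySem.Str.splitlines post_body).drop
      ((PySem.Str.splitlines post_body).takeWhile pvIsHeader).length) =
      (match (PySem.Str.splitlines post_body).drop
          ((PySem.Str.splitlines post_body).takeWhile pvIsHeader).length with
       | [] => []
       | l :: tl => if PySem.Str.strip l == "" then tl else l :: tl) := by
    rw [pvSkipBlank.eq_def]
  simp only [h1, h2, hsb, List.nil_append]
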